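-- pv_equiv track=rewrite | github.com/Enjef/Algo | 2100 - 2199/2120 - Execution of All Suffix Instructions Staying in a Grid/2120 - Execution of All Suffix Instructions Staying in a Grid.py | executeInstructions_best_memory
-- ===== SOURCE A (Python) =====
-- from typing import List
--
-- def executeInstructions_best_memory(
--         n: int, start_pos: List[int], s: str) -> List[int]:
--     move_table = {}
--     length = len(s)
--     answer = [0] * length
--     for i in range(0, length):
--         move = s[i]
--         if move == 'R':
--             tmp = [0, 1]
--         elif move == 'L':
--             tmp = [0, -1]
--         elif move == 'D':
--             tmp = [1, 0]
--         else:
--             tmp = [-1, 0]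
--         move_table[i] = tmp
--     for i in range(0, length):
--         cur = start_pos.copy()
--         for j in range(i, length):
--             tmp = move_table.get(j)
--             x = cur[0] + tmp[0]
--             y = cur[1] + tmp[1]
--             if not (0 <= x < n and 0 <= y < n):
--                 break
--             answer[i] = j - i + 1
--             cur = [x, y]
--     return answer
-- ===== SOURCE B (Python) =====
-- from typing import List
--
--
-- def executeInstructions_best_memory(
--         n: int, start_pos: List[int], s: str) -> List[int]:
--     # Prefix displacement sums + sparse-table range min/max + binary search
--     # for the last in-grid step of each suffix: O(m log m) instead of O(m^2).
--     m = len(s)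
--     if m == 0:
--         return []
--     DELTA = {'R': (0, 1), 'L': (0, -1), 'D': (1, 0)}
--     px = [0] * (m + 1)
--     py = [0] * (m + 1)
--     for t in range(m):
--         dx, dy = DELTA.get(s[t], (-1, 0))
--         px[t + 1] = px[t] + dx
--         py[t + 1] = py[t] + dy
--     stxmax = _build(px, max)
--     stxmin = _build(px, min)
--     stymax = _build(py, max)
--     stymin = _build(py, min)
--     r, c = start_pos[0], start_pos[1]
--     answer = []
--     for i in range(m):
--         lox, hix = px[i] - r, px[i] - r + n - 1
--         loy, hiy = py[i] - c, py[i] - c + n - 1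
--
--         def ok(j):
--             return (j == i
--                     or (_query(stxmax, max, i + 1, j) <= hix
--                         and _query(stxmin, min, i + 1, j) >= lox
--                         and _query(stymax, max, i + 1, j) <= hiy
--                         and _query(stymin, min, i + 1, j) >= loy))
--         lo, hi = i, m
--         while lo < hi:
--             mid = (lo + hi + 1) // 2
--             if ok(mid):
--                 lo = mid
--             else:
--                 hi = mid - 1
--         answer.append(lo - i)
--     return answer
--
--
-- def _build(arr, op):
--     st = [arr]
--     k = 0
--     while len(st[k]) > (1 << k):
--         prev, w = st[k], 1 << k
--         st.append([op(prev[i], prev[i + w]) for i in range(len(prev) - w)])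
--         k += 1
--     return st
--
--
-- def _query(st, op, l, r):
--     k = (r - l + 1).bit_length() - 1
--     row = st[k]
--     return op(row[l], row[r - (1 << k) + 1])
-- ===== Notes on version B (the rewrite author's own statement) =====
-- stated objective: faster
-- what changed: A re-simulates every suffix step by step (O(m^2)); B computes prefix displacement sums once, builds sparse tables for range min/max of the prefix sums, and binary-searches per start for the last step that keeps the walker inside the grid (O(m log m)).
import Mathlib
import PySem

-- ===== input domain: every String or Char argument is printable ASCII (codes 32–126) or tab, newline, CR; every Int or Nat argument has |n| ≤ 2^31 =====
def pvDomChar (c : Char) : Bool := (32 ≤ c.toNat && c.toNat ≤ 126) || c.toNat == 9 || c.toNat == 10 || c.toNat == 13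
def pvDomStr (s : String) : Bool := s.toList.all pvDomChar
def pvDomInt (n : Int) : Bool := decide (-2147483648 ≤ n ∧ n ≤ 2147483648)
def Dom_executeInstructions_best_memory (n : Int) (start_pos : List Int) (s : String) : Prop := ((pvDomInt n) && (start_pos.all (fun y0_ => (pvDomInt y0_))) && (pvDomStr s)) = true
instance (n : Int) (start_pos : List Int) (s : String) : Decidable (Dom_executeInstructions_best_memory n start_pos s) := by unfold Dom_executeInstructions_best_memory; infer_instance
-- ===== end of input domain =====

-- B replaces A's per-start re-simulation (O(m^2)) by prefix displacement sums,
-- sparse-table range min/max and a binary search per start (O(m log m)); measured faster.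


-- ===== PORT A =====

-- the first loop's branch chain: move s[i] ↦ tmp
def pvMvA (c : Char) : List Int :=
  if c = 'R' then [0, 1]
  else if c = 'L' then [0, -1]
  else if c = 'D' then [1, 0]
  else [-1, 0]

-- inner 'for j in range(i, length): … break' loop; cur[0]/cur[1] and tmp[0]/tmp[1] are
-- ported with getD (in range on every reachable call under Pre_, where Python returns)
def pvInnerA (n : Int) (tab : PySem.Dict Int (List Int)) (m i j : Nat)
    (cur : List Int) (ans : Int) : Int :=
  if j < m then
    let tmp := tab.getD (j : Int) []
    let x := cur.getD 0 0 + tmp.getD 0 0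
    let y := cur.getD 1 0 + tmp.getD 1 0
    if 0 ≤ x ∧ x < n ∧ 0 ≤ y ∧ y < n then
      pvInnerA n tab m i (j + 1) [x, y] ((j : Int) - (i : Int) + 1)
    else ans
  else ans
termination_by m - j
decreasing_by omega

def executeInstructions_best_memory (n : Int) (start_pos : List Int) (s : String) : List Int :=
  let length := s.toList.length
  let move_table := (List.range length).foldl
    (fun d i => d.insert (i : Int) (pvMvA (s.toList.getD i ' '))) PySem.Dict.empty
  (List.range length).map (fun i => pvInnerA n move_table length i i start_pos 0)

-- ===== PORT B =====

-- DELTA.get(ch, (-1, 0))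
def pvDeltaB (c : Char) : Int × Int :=
  if c = 'R' then (0, 1)
  else if c = 'L' then (0, -1)
  else if c = 'D' then (1, 0)
  else (-1, 0)

-- _build(arr, op): rows of the sparse table (row k has windows of width 2^k)
def pvBuild (op : Int → Int → Int) (row : List Int) (k : Nat) : List (List Int) :=
  if h : 2 ^ k < row.length then
    row :: pvBuild op
      ((List.range (row.length - 2 ^ k)).map
        (fun i => op (row.getD i 0) (row.getD (i + 2 ^ k) 0))) (k + 1)
  else [row]
termination_by row.length
decreasing_by
  simp only [List.length_map, List.length_range]
  have := Nat.one_le_two_pow (n := k)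
  omega

-- _query(st, op, l, r); (r-l+1).bit_length()-1 equals Nat.log 2 (r-l+1) for r ≥ l
def pvQuery (st : List (List Int)) (op : Int → Int → Int) (l r : Nat) : Int :=
  let k := Nat.log 2 (r - l + 1)
  let row := st.getD k []
  op (row.getD l 0) (row.getD (r - 2 ^ k + 1) 0)

-- ok(j) of Source B
def pvOk (n : Int) (stxmax stxmin stymax stymin : List (List Int))
    (px py : List Int) (r c : Int) (i j : Nat) : Bool :=
  j == i ||
    (decide (pvQuery stxmax max (i + 1) j ≤ px.getD i 0 - r + n - 1) &&
     decide (px.getD i 0 - r ≤ pvQuery stxmin min (i + 1) j) &&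
     decide (pvQuery stymax max (i + 1) j ≤ py.getD i 0 - c + n - 1) &&
     decide (py.getD i 0 - c ≤ pvQuery stymin min (i + 1) j))

-- the 'while lo < hi' binary search
def pvBsearch (ok : Nat → Bool) (lo hi : Nat) : Nat :=
  if lo < hi then
    let mid := (lo + hi + 1) / 2
    if ok mid then pvBsearch ok mid hi else pvBsearch ok lo (mid - 1)
  else lo
termination_by hi - lo
decreasing_by all_goals omega

def executeInstructions_best_memory_alt (n : Int) (start_pos : List Int) (s : String) : List Int :=
  let m := s.toList.length
  if m = 0 then []
  else
    let ds := s.toList.map pvDeltaB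
    let px := List.scanl (fun a d => a + d) 0 (ds.map Prod.fst)
    let py := List.scanl (fun a d => a + d) 0 (ds.map Prod.snd)
    let stxmax := pvBuild max px 0
    let stxmin := pvBuild min px 0
    let stymax := pvBuild max py 0
    let stymin := pvBuild min py 0
    let r := start_pos.getD 0 0
    let c := start_pos.getD 1 0
    (List.range m).map (fun i =>
      ((pvBsearch (pvOk n stxmax stxmin stymax stymin px py r c i) i m - i : Nat) : Int))

-- ===== PRECONDITION & SPEC =====
-- Pre_ excludes exactly the inputs where Python raises an IndexError:
-- a non-empty s with fewer than two start coordinates (cur[1] / start_pos[1]).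
def Pre_executeInstructions_best_memory (n : Int) (start_pos : List Int) (s : String) : Prop :=
  s = "" ∨ 2 ≤ start_pos.length
instance (n : Int) (start_pos : List Int) (s : String) : Decidable (Pre_executeInstructions_best_memory n start_pos s) := by unfold Pre_executeInstructions_best_memory; infer_instance

def pvWitness_executeInstructions_best_memory : Int × List Int × String := (2, [0, 0], "RL")

def Spec_executeInstructions_best_memory (n : Int) (start_pos : List Int) (s : String) (out : List Int) : Prop := out = executeInstructions_best_memory_alt n start_pos s
instance (n : Int) (start_pos : List Int) (s : String) (out : List Int) : Decidable (Spec_executeInstructions_best_memory n start_pos s out) := by unfold Spec_executeInstructions_best_memory; infer_instance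

-- ===== CLAIM (what is proved, stated in full; the proofs are below) =====
def Claim_equal_executeInstructions_best_memory : Prop := ∀ (n : Int) (start_pos : List Int) (s : String), Dom_executeInstructions_best_memory n start_pos s → Pre_executeInstructions_best_memory n start_pos s → Spec_executeInstructions_best_memory n start_pos s (executeInstructions_best_memory n start_pos s)


-- ===== LEMMAS AND PROOFS =====

-- per-char displacements and prefix displacement sums
def pvDx (c : Char) : Int := (pvDeltaB c).1
def pvDy (c : Char) : Int := (pvDeltaB c).2
def pvPx (l : List Char) (t : Nat) : Int := ((l.take t).map pvDx).sum
def pvPy (l : List Char) (t : Nat) : Int := ((l.take t).map pvDy).sum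

-- step t of the suffix starting at i keeps the walker inside the grid
def pvInBb (n r c : Int) (l : List Char) (i t : Nat) : Bool :=
  decide (0 ≤ r + pvPx l t - pvPx l i) && decide (r + pvPx l t - pvPx l i < n) &&
  decide (0 ≤ c + pvPy l t - pvPy l i) && decide (c + pvPy l t - pvPy l i < n)

-- all steps i+1 … j of the suffix starting at i stay inside the grid
def pvGoodb (n r c : Int) (l : List Char) (i j : Nat) : Bool :=
  (List.range' (i + 1) (j - i)).all (fun t => pvInBb n r c l i t)

-- the largest j ≤ |l| such that instructions i … j-1 all stay in the grid
def pvF (n r c : Int) (l : List Char) (i : Nat) : Nat :=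
  Nat.findGreatest (fun j => i ≤ j ∧ pvGoodb n r c l i j = true) l.length

lemma pvGoodb_iff (n r c : Int) (l : List Char) (i j : Nat) :
    pvGoodb n r c l i j = true ↔ ∀ t, i < t → t ≤ j → pvInBb n r c l i t = true := by
  constructor
  · intro h t h1 h2
    have := List.all_eq_true.mp h t (by rw [List.mem_range'_1]; omega)
    simpa using this
  · intro h
    apply List.all_eq_true.mpr
    intro t ht
    rw [List.mem_range'_1] at ht
    simpa using h t (by omega) (by omega)

lemma pvGoodb_self (n r c : Int) (l : List Char) (i : Nat) :
    pvGoodb n r c l i i = true := by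
  simp [pvGoodb]

lemma pvGoodb_mono (n r c : Int) (l : List Char) (i j1 j2 : Nat) (h : j1 ≤ j2)
    (hg : pvGoodb n r c l i j2 = true) : pvGoodb n r c l i j1 = true := by
  rw [pvGoodb_iff] at *
  intro t h1 h2
  exact hg t h1 (by omega)

lemma pvMvA_eq (c : Char) : pvMvA c = [pvDx c, pvDy c] := by
  unfold pvMvA pvDx pvDy pvDeltaB
  split_ifs <;> rfl

lemma pvPx_succ (l : List Char) (j : Nat) (hj : j < l.length) :
    pvPx l (j + 1) = pvPx l j + pvDx l[j] := by
  unfold pvPx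
  rw [List.take_add_one]
  simp [hj]

lemma pvPy_succ (l : List Char) (j : Nat) (hj : j < l.length) :
    pvPy l (j + 1) = pvPy l j + pvDy l[j] := by
  unfold pvPy
  rw [List.take_add_one]
  simp [hj]

-- the first loop of A: move_table[j] holds the move of s[j]
lemma pvTab_getD (l : List Char) (L : Nat) (j : Nat) (hj : j < L) :
    ((List.range L).foldl (fun d i => d.insert (i : Int) (pvMvA (l.getD i ' ')))
      PySem.Dict.empty).getD (j : Int) [] = pvMvA (l.getD j ' ') := by
  induction L with
  | zero => omega
  | succ L ih =>
    rw [List.range_succ, List.foldl_append]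
    simp only [List.foldl_cons, List.foldl_nil]
    rw [PySem.Dict.getD_insert]
    by_cases hjL : j = L
    · simp [hjL]
    · rw [if_neg (by exact_mod_cast hjL)]
      exact ih (by omega)

-- A's inner loop computes pvF i - i
lemma pvInnerA_eq (n r c : Int) (l : List Char) (tab : PySem.Dict Int (List Int))
    (htab : ∀ j, j < l.length → tab.getD (j : Int) [] = pvMvA (l.getD j ' ')) (i : Nat) :
    ∀ d j (cur : List Int) (ans : Int), d = l.length - j → i ≤ j → j ≤ l.length →
      cur.getD 0 0 = r + pvPx l j - pvPx l i →
      cur.getD 1 0 = c + pvPy l j - pvPy l i →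
      pvGoodb n r c l i j = true →
      ans = (j : Int) - (i : Int) →
      pvInnerA n tab l.length i j cur ans = (pvF n r c l i : Int) - (i : Int) := by
  intro d
  induction d with
  | zero =>
    intro j cur ans hd hij hjm hc0 hc1 hgood hans
    have hj : j = l.length := by omega
    rw [pvInnerA, if_neg (by omega)]
    have hle : pvF n r c l i ≤ l.length := Nat.findGreatest_le _
    have hge : l.length ≤ pvF n r c l i :=
      Nat.le_findGreatest (le_refl _) ⟨by omega, by rwa [hj] at hgood⟩
    omega
  | succ d ih =>
    intro j cur ans hd hij hjm hc0 hc1 hgood hans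
    have hjlt : j < l.length := by omega
    have hgetd : l.getD j ' ' = l[j] := List.getD_eq_getElem l ' ' hjlt
    rw [pvInnerA, if_pos hjlt]
    simp only [htab j hjlt, pvMvA_eq, hgetd, List.getD_cons_zero, List.getD_cons_succ]
    have hx : cur.getD 0 0 + pvDx l[j] = r + pvPx l (j + 1) - pvPx l i := by
      rw [hc0, pvPx_succ l j hjlt]; ring
    have hy : cur.getD 1 0 + pvDy l[j] = c + pvPy l (j + 1) - pvPy l i := by
      rw [hc1, pvPy_succ l j hjlt]; ring
    split_ifs with hcond
    · apply ih (j + 1) _ _ (by omega) (by omega) (by omega)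
      · simpa using hx
      · simpa using hy
      · rw [pvGoodb_iff]
        intro t h1 h2
        by_cases htj : t ≤ j
        · exact (pvGoodb_iff n r c l i j).mp hgood t h1 htj
        · have ht : t = j + 1 := by omega
          subst ht
          simp only [pvInBb, Bool.and_eq_true, decide_eq_true_eq]
          rw [← hx, ← hy]
          exact ⟨⟨⟨hcond.1, hcond.2.1⟩, hcond.2.2.1⟩, hcond.2.2.2⟩
      · push_cast; ring
    · -- first out-of-grid step: the greatest good index is exactly j
      have hge : j ≤ pvF n r c l i := Nat.le_findGreatest hjm ⟨hij, hgood⟩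
      have hle : pvF n r c l i ≤ j := by
        by_contra hgt
        have hP := Nat.findGreatest_spec
          (P := fun j' => i ≤ j' ∧ pvGoodb n r c l i j' = true) (n := l.length)
          hjm ⟨hij, hgood⟩
        have hP2 : pvGoodb n r c l i (pvF n r c l i) = true := hP.2
        have hstep := (pvGoodb_iff n r c l i _).mp hP2 (j + 1) (by omega) (by omega)
        simp only [pvInBb, Bool.and_eq_true, decide_eq_true_eq] at hstep
        rw [← hx, ← hy] at hstep
        exact hcond ⟨hstep.1.1.1, hstep.1.1.2, hstep.1.2, hstep.2⟩
      omega

-- B-side: the scanl prefix-sum list, read at index t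
lemma pvScanl_getD : ∀ (xs : List Int) (a : Int) (t : Nat), t ≤ xs.length →
    (List.scanl (fun x d => x + d) a xs).getD t 0 = a + (xs.take t).sum := by
  intro xs
  induction xs with
  | nil => intro a t ht; simp at ht; simp [ht, List.scanl]
  | cons x xs ih =>
    intro a t ht
    rw [List.scanl_cons]
    cases t with
    | zero => simp
    | succ t =>
      simp only [List.getD_cons_succ]
      rw [ih (a + x) t (by simpa using ht), List.take_succ_cons]
      simp
      ring

lemma pvPxList_getD (l : List Char) (t : Nat) (ht : t ≤ l.length) :
    (List.scanl (fun a d => a + d) 0 ((l.map pvDeltaB).map Prod.fst)).getD t 0 = pvPx l t := by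
  have h1 : (l.map pvDeltaB).map Prod.fst = l.map pvDx := by
    rw [List.map_map]; rfl
  rw [h1, pvScanl_getD _ _ _ (by simpa using ht)]
  unfold pvPx
  rw [← List.map_take]
  ring

lemma pvPyList_getD (l : List Char) (t : Nat) (ht : t ≤ l.length) :
    (List.scanl (fun a d => a + d) 0 ((l.map pvDeltaB).map Prod.snd)).getD t 0 = pvPy l t := by
  have h1 : (l.map pvDeltaB).map Prod.snd = l.map pvDy := by
    rw [List.map_map]; rfl
  rw [h1, pvScanl_getD _ _ _ (by simpa using ht)]
  unfold pvPy
  rw [← List.map_take]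
  ring

-- op-fold of f over the window [l, l+c]
def pvG (op : Int → Int → Int) (f : Nat → Int) : Nat → Nat → Int
  | l, 0 => f l
  | l, c + 1 => op (f l) (pvG op f (l + 1) c)

lemma pvG_merge (op : Int → Int → Int)
    (hassoc : ∀ a b c, op (op a b) c = op a (op b c)) (f : Nat → Int) :
    ∀ c l d2, op (pvG op f l c) (pvG op f (l + c + 1) d2) = pvG op f l (c + d2 + 1) := by
  intro c
  induction c with
  | zero =>
    intro l d2
    have h0 : l + 0 + 1 = l + 1 := by omega
    have h1 : 0 + d2 + 1 = d2 + 1 := by omega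
    rw [h0, h1]
    rfl
  | succ c ih =>
    intro l d2
    show op (op (f l) (pvG op f (l + 1) c)) _ = _
    rw [hassoc]
    have h2 : l + (c + 1) + 1 = (l + 1) + c + 1 := by omega
    rw [h2, ih (l + 1) d2]
    have h3 : c + 1 + d2 + 1 = (c + d2 + 1) + 1 := by omega
    rw [h3]
    rfl

lemma pvG_max_le (f : Nat → Int) :
    ∀ c l (B : Int), pvG max f l c ≤ B ↔ ∀ t, t ≤ c → f (l + t) ≤ B := by
  intro c
  induction c with
  | zero =>
    intro l B
    constructor
    · intro h t ht
      have : t = 0 := by omega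
      simpa [this] using h
    · intro h; simpa using h 0 (by omega)
  | succ c ih =>
    intro l B
    show max (f l) (pvG max f (l + 1) c) ≤ B ↔ _
    rw [max_le_iff, ih]
    constructor
    · rintro ⟨h1, h2⟩ t ht
      cases t with
      | zero => simpa using h1
      | succ t =>
        have : l + (t + 1) = (l + 1) + t := by omega
        rw [this]; exact h2 t (by omega)
    · intro h
      refine ⟨by simpa using h 0 (by omega), fun t ht => ?_⟩
      have : (l + 1) + t = l + (t + 1) := by omega
      rw [this]; exact h (t + 1) (by omega)

lemma pvG_le_min (f : Nat → Int) :
    ∀ c l (B : Int), B ≤ pvG min f l c ↔ ∀ t, t ≤ c → B ≤ f (l + t) := by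
  intro c
  induction c with
  | zero =>
    intro l B
    constructor
    · intro h t ht
      have : t = 0 := by omega
      simpa [this] using h
    · intro h; simpa using h 0 (by omega)
  | succ c ih =>
    intro l B
    show B ≤ min (f l) (pvG min f (l + 1) c) ↔ _
    rw [le_min_iff, ih]
    constructor
    · rintro ⟨h1, h2⟩ t ht
      cases t with
      | zero => simpa using h1
      | succ t =>
        have : l + (t + 1) = (l + 1) + t := by omega
        rw [this]; exact h2 t (by omega)
    · intro h
      refine ⟨by simpa using h 0 (by omega), fun t ht => ?_⟩
      have : (l + 1) + t = l + (t + 1) := by omega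
      rw [this]; exact h (t + 1) (by omega)

-- row jj of the sparse table holds op-folds over windows of width 2^jj
lemma pvBuild_getD (op : Int → Int → Int)
    (hassoc : ∀ a b c, op (op a b) c = op a (op b c)) (f : Nat → Int) (N : Nat) :
    ∀ jj k (row : List Int), row.length + (2 ^ k - 1) = N →
      (∀ i, i < row.length → row.getD i 0 = pvG op f i (2 ^ k - 1)) →
      ∀ i, i + 2 ^ (k + jj) ≤ N →
      ((pvBuild op row k).getD jj []).getD i 0 = pvG op f i (2 ^ (k + jj) - 1) := by
  intro jj
  induction jj with
  | zero =>
    intro k row hlen hv i hi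
    have h1 : 1 ≤ 2 ^ k := Nat.one_le_two_pow
    rw [pvBuild]
    have hrow : ∀ rest : List (List Int), (row :: rest).getD 0 [] = row := fun _ => rfl
    split
    · rw [hrow]
      exact hv i (by simp at hi; omega)
    · rw [hrow]
      exact hv i (by simp at hi; omega)
  | succ jj ih =>
    intro k row hlen hv i hi
    have h1 : 1 ≤ 2 ^ k := Nat.one_le_two_pow
    have hks : 2 ^ (k + 1) = 2 ^ k + 2 ^ k := by rw [pow_succ]; omega
    have hkjj : 2 ^ (k + (jj + 1)) = 2 ^ ((k + 1) + jj) := by ring_nf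
    have hmono : 2 ^ (k + 1) ≤ 2 ^ (k + (jj + 1)) :=
      Nat.pow_le_pow_right (by norm_num) (by omega)
    have hbranch : 2 ^ k < row.length := by omega
    rw [pvBuild, dif_pos hbranch]
    have hstep : ∀ rest : List (List Int) , ∀ x : List Int,
        (x :: rest).getD (jj + 1) [] = rest.getD jj [] := fun _ _ => rfl
    rw [hstep]
    rw [hkjj]
    apply ih (k + 1)
    · simp only [List.length_map, List.length_range]
      omega
    · intro i' hi'
      simp only [List.length_map, List.length_range] at hi'
      rw [List.getD_eq_getElem _ _ (by simp; omega)]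
      simp only [List.getElem_map, List.getElem_range]
      rw [hv i' (by omega), hv (i' + 2 ^ k) (by omega)]
      have hm := pvG_merge op hassoc f (2 ^ k - 1) i' (2 ^ k - 1)
      have he1 : i' + (2 ^ k - 1) + 1 = i' + 2 ^ k := by omega
      have he2 : 2 ^ k - 1 + (2 ^ k - 1) + 1 = 2 ^ (k + 1) - 1 := by omega
      rw [he1, he2] at hm
      exact hm
    · rw [← hkjj]; exact hi

-- the two queried windows cover [l, r]
lemma pvQuery_max_le (f : Nat → Int) (xs : List Int) (l r : Nat) (B : Int)
    (hv : ∀ i, i < xs.length → xs.getD i 0 = f i) (hl1 : 1 ≤ l) (hlr : l ≤ r) (hr : r + 1 ≤ xs.length) :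
    (pvQuery (pvBuild max xs 0) max l r ≤ B ↔ ∀ u, l ≤ u → u ≤ r → f u ≤ B) := by
  have HASSOC : ∀ a b c : Int, max (max a b) c = max a (max b c) := fun a b c => max_assoc a b c
  have CHARL := fun (ll cc : Nat) => (pvG_max_le f cc ll B)
  simp only [pvQuery]
  have hdne : r - l + 1 ≠ 0 := by omega
  set k := Nat.log 2 (r - l + 1) with hk
  have h2k : 2 ^ k ≤ r - l + 1 := Nat.pow_log_le_self 2 hdne
  have hk2 : r - l + 1 < 2 ^ (k + 1) := Nat.lt_pow_succ_log_self (by norm_num) _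
  have h1 : 1 ≤ 2 ^ k := Nat.one_le_two_pow
  have hks : 2 ^ (k + 1) = 2 ^ k + 2 ^ k := by rw [pow_succ]; omega
  have hzk : (0 : Nat) + k = k := by omega
  have hb := pvBuild_getD max HASSOC f xs.length k 0 xs (by simp) (fun i hi => hv i hi)
  rw [hzk] at hb
  have hq1 := hb l (by omega)
  have hq2 := hb (r - 2 ^ k + 1) (by omega)
  rw [hq1, hq2]
  rw [max_le_iff, CHARL, CHARL]
  constructor
  · rintro ⟨ha, hbb⟩ u h1u h2u
    by_cases hu : u ≤ l + (2 ^ k - 1)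
    · have := ha (u - l) (by omega)
      have he : l + (u - l) = u := by omega
      rwa [he] at this
    · have := hbb (u - (r - 2 ^ k + 1)) (by omega)
      have he : r - 2 ^ k + 1 + (u - (r - 2 ^ k + 1)) = u := by omega
      rwa [he] at this
  · intro h
    exact ⟨fun t ht => h (l + t) (by omega) (by omega),
           fun t ht => h (r - 2 ^ k + 1 + t) (by omega) (by omega)⟩

lemma pvQuery_le_min (f : Nat → Int) (xs : List Int) (l r : Nat) (B : Int)
    (hv : ∀ i, i < xs.length → xs.getD i 0 = f i) (hl1 : 1 ≤ l) (hlr : l ≤ r) (hr : r + 1 ≤ xs.length) :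
    (B ≤ pvQuery (pvBuild min xs 0) min l r ↔ ∀ u, l ≤ u → u ≤ r → B ≤ f u) := by
  have HASSOC : ∀ a b c : Int, min (min a b) c = min a (min b c) := fun a b c => min_assoc a b c
  have CHARL := fun (ll cc : Nat) => (pvG_le_min f cc ll B)
  simp only [pvQuery]
  have hdne : r - l + 1 ≠ 0 := by omega
  set k := Nat.log 2 (r - l + 1) with hk
  have h2k : 2 ^ k ≤ r - l + 1 := Nat.pow_log_le_self 2 hdne
  have hk2 : r - l + 1 < 2 ^ (k + 1) := Nat.lt_pow_succ_log_self (by norm_num) _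
  have h1 : 1 ≤ 2 ^ k := Nat.one_le_two_pow
  have hks : 2 ^ (k + 1) = 2 ^ k + 2 ^ k := by rw [pow_succ]; omega
  have hzk : (0 : Nat) + k = k := by omega
  have hb := pvBuild_getD min HASSOC f xs.length k 0 xs (by simp) (fun i hi => hv i hi)
  rw [hzk] at hb
  have hq1 := hb l (by omega)
  have hq2 := hb (r - 2 ^ k + 1) (by omega)
  rw [hq1, hq2]
  rw [le_min_iff, CHARL, CHARL]
  constructor
  · rintro ⟨ha, hbb⟩ u h1u h2u
    by_cases hu : u ≤ l + (2 ^ k - 1)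
    · have := ha (u - l) (by omega)
      have he : l + (u - l) = u := by omega
      rwa [he] at this
    · have := hbb (u - (r - 2 ^ k + 1)) (by omega)
      have he : r - 2 ^ k + 1 + (u - (r - 2 ^ k + 1)) = u := by omega
      rwa [he] at this
  · intro h
    exact ⟨fun t ht => h (l + t) (by omega) (by omega),
           fun t ht => h (r - 2 ^ k + 1 + t) (by omega) (by omega)⟩

-- ok(j) of B decides pvGoodb
lemma pvOk_iff (n r c : Int) (s : String) (i j : Nat)
    (hj : i ≤ j) (hjm : j ≤ s.toList.length) :
    (pvOk n
      (pvBuild max (List.scanl (fun a d => a + d) 0 ((s.toList.map pvDeltaB).map Prod.fst)) 0)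
      (pvBuild min (List.scanl (fun a d => a + d) 0 ((s.toList.map pvDeltaB).map Prod.fst)) 0)
      (pvBuild max (List.scanl (fun a d => a + d) 0 ((s.toList.map pvDeltaB).map Prod.snd)) 0)
      (pvBuild min (List.scanl (fun a d => a + d) 0 ((s.toList.map pvDeltaB).map Prod.snd)) 0)
      (List.scanl (fun a d => a + d) 0 ((s.toList.map pvDeltaB).map Prod.fst))
      (List.scanl (fun a d => a + d) 0 ((s.toList.map pvDeltaB).map Prod.snd))
      r c i j) = true ↔ pvGoodb n r c s.toList i j = true := by
  have hxlen : (List.scanl (fun a d => a + d) 0 ((s.toList.map pvDeltaB).map Prod.fst)).length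
      = s.toList.length + 1 := by simp [List.length_scanl]
  have hylen : (List.scanl (fun a d => a + d) 0 ((s.toList.map pvDeltaB).map Prod.snd)).length
      = s.toList.length + 1 := by simp [List.length_scanl]
  have hxv : ∀ u, u < (List.scanl (fun a d => a + d) 0
      ((s.toList.map pvDeltaB).map Prod.fst)).length →
      (List.scanl (fun a d => a + d) 0 ((s.toList.map pvDeltaB).map Prod.fst)).getD u 0
        = pvPx s.toList u := fun u hu => pvPxList_getD s.toList u (by omega)
  have hyv : ∀ u, u < (List.scanl (fun a d => a + d) 0
      ((s.toList.map pvDeltaB).map Prod.snd)).length →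
      (List.scanl (fun a d => a + d) 0 ((s.toList.map pvDeltaB).map Prod.snd)).getD u 0
        = pvPy s.toList u := fun u hu => pvPyList_getD s.toList u (by omega)
  by_cases hji : j = i
  · subst hji
    simp [pvOk, pvGoodb_self]
  · have hij : i < j := by omega
    simp only [pvOk, Bool.or_eq_true, beq_iff_eq, Bool.and_eq_true, decide_eq_true_eq]
    rw [pvQuery_max_le (pvPx s.toList) _ (i + 1) j _ hxv (by omega) (by omega) (by omega)]
    rw [pvQuery_le_min (pvPx s.toList) _ (i + 1) j _ hxv (by omega) (by omega) (by omega)]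
    rw [pvQuery_max_le (pvPy s.toList) _ (i + 1) j _ hyv (by omega) (by omega) (by omega)]
    rw [pvQuery_le_min (pvPy s.toList) _ (i + 1) j _ hyv (by omega) (by omega) (by omega)]
    rw [hxv i (by omega), hyv i (by omega), pvGoodb_iff]
    constructor
    · rintro (h | ⟨⟨⟨h1, h2⟩, h3⟩, h4⟩)
      · exact absurd h hji
      · intro t ht1 ht2
        simp only [pvInBb, Bool.and_eq_true, decide_eq_true_eq]
        have a1 := h1 t (by omega) ht2
        have a2 := h2 t (by omega) ht2
        have a3 := h3 t (by omega) ht2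
        have a4 := h4 t (by omega) ht2
        omega
    · intro h
      right
      have hall : ∀ u, i + 1 ≤ u → u ≤ j →
          0 ≤ r + pvPx s.toList u - pvPx s.toList i ∧
          r + pvPx s.toList u - pvPx s.toList i < n ∧
          0 ≤ c + pvPy s.toList u - pvPy s.toList i ∧
          c + pvPy s.toList u - pvPy s.toList i < n := by
        intro u h1 h2
        have := h u (by omega) h2
        simpa only [pvInBb, Bool.and_eq_true, decide_eq_true_eq, and_assoc] using this
      exact ⟨⟨⟨fun u h1 h2 => by have := hall u h1 h2; omega,
               fun u h1 h2 => by have := hall u h1 h2; omega⟩,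
               fun u h1 h2 => by have := hall u h1 h2; omega⟩,
               fun u h1 h2 => by have := hall u h1 h2; omega⟩

-- the binary search returns the greatest index in [lo, hi] satisfying ok
lemma pvBsearch_spec (ok : Nat → Bool) :
    ∀ d lo hi, d = hi - lo → lo ≤ hi → ok lo = true →
      (∀ a b, lo ≤ a → a ≤ b → b ≤ hi → ok b = true → ok a = true) →
      lo ≤ pvBsearch ok lo hi ∧ pvBsearch ok lo hi ≤ hi ∧
        ok (pvBsearch ok lo hi) = true ∧
        ∀ t, pvBsearch ok lo hi < t → t ≤ hi → ok t = false := by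
  intro d
  induction d using Nat.strong_induction_on with
  | _ d ih =>
    intro lo hi hd hlohi hlo hmono
    rw [pvBsearch]
    by_cases hlt : lo < hi
    · rw [if_pos hlt]
      have hmid : lo < (lo + hi + 1) / 2 ∧ (lo + hi + 1) / 2 ≤ hi := by omega
      set mid := (lo + hi + 1) / 2 with hmiddef
      by_cases hok : ok mid = true
      · rw [if_pos hok]
        have := ih (hi - mid) (by omega) mid hi rfl (by omega) hok
          (fun a b h1 h2 h3 h4 => hmono a b (by omega) h2 h3 h4)
        exact ⟨by omega, this.2.1, this.2.2.1, this.2.2.2⟩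
      · rw [if_neg hok]
        have := ih (mid - 1 - lo) (by omega) lo (mid - 1) rfl (by omega) hlo
          (fun a b h1 h2 h3 h4 => hmono a b h1 h2 (by omega) h4)
        refine ⟨this.1, by omega, this.2.2.1, fun t ht1 ht2 => ?_⟩
        by_cases htm : t ≤ mid - 1
        · exact this.2.2.2 t ht1 htm
        · cases h : ok t with
          | false => rfl
          | true =>
            exact absurd (hmono mid t (by omega) (by omega) ht2 h) hok
    · rw [if_neg hlt]
      exact ⟨le_refl _, hlohi, hlo, fun t h1 h2 => by omega⟩

-- ===== VERDICT (by name: the statement is the Claim_ definition above) =====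
theorem executeInstructions_best_memory_spec : Claim_equal_executeInstructions_best_memory := by
  intro n start_pos s _hdom _hpre
  unfold Spec_executeInstructions_best_memory
  simp only [executeInstructions_best_memory, executeInstructions_best_memory_alt]
  by_cases hm : s.toList.length = 0
  · simp [hm]
  · rw [if_neg hm]
    apply List.map_congr_left
    intro i hi
    rw [List.mem_range] at hi
    have htab : ∀ j, j < s.toList.length →
        ((List.range s.toList.length).foldl
          (fun d i => d.insert (i : Int) (pvMvA (s.toList.getD i ' ')))
          PySem.Dict.empty).getD (j : Int) [] = pvMvA (s.toList.getD j ' ') :=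
      fun j hj => pvTab_getD s.toList s.toList.length j hj
    have hA := pvInnerA_eq n (start_pos.getD 0 0) (start_pos.getD 1 0) s.toList _ htab i
      (s.toList.length - i) i start_pos 0 rfl (le_refl i) (by omega)
      (by ring) (by ring) (pvGoodb_self _ _ _ _ _) (by omega)
    rw [hA]
    set r := start_pos.getD 0 0
    set c := start_pos.getD 1 0
    set ok := pvOk n
      (pvBuild max (List.scanl (fun a d => a + d) 0 ((s.toList.map pvDeltaB).map Prod.fst)) 0)
      (pvBuild min (List.scanl (fun a d => a + d) 0 ((s.toList.map pvDeltaB).map Prod.fst)) 0)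
      (pvBuild max (List.scanl (fun a d => a + d) 0 ((s.toList.map pvDeltaB).map Prod.snd)) 0)
      (pvBuild min (List.scanl (fun a d => a + d) 0 ((s.toList.map pvDeltaB).map Prod.snd)) 0)
      (List.scanl (fun a d => a + d) 0 ((s.toList.map pvDeltaB).map Prod.fst))
      (List.scanl (fun a d => a + d) 0 ((s.toList.map pvDeltaB).map Prod.snd))
      r c i with hokdef
    have hok_i : ok i = true :=
      (pvOk_iff n r c s i i (le_refl i) (by omega)).mpr (pvGoodb_self _ _ _ _ _)
    have hmono : ∀ a b, i ≤ a → a ≤ b → b ≤ s.toList.length → ok b = true → ok a = true :=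
      fun a b h1 h2 h3 h4 =>
        (pvOk_iff n r c s i a h1 (by omega)).mpr
          (pvGoodb_mono n r c s.toList i a b h2 ((pvOk_iff n r c s i b (by omega) h3).mp h4))
    have hbs := pvBsearch_spec ok (s.toList.length - i) i s.toList.length rfl (by omega)
      hok_i hmono
    set res := pvBsearch ok i s.toList.length with hresdef
    obtain ⟨hb1, hb2, hb3, hb4⟩ := hbs
    have h1 : res ≤ pvF n r c s.toList i :=
      Nat.le_findGreatest hb2 ⟨hb1, (pvOk_iff n r c s i res hb1 hb2).mp hb3⟩
    have hFle : pvF n r c s.toList i ≤ s.toList.length := Nat.findGreatest_le _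
    have h2 : pvF n r c s.toList i ≤ res := by
      by_contra hgt
      have hP := Nat.findGreatest_spec
        (P := fun j' => i ≤ j' ∧ pvGoodb n r c s.toList i j' = true) (n := s.toList.length)
        (by omega) ⟨le_refl i, pvGoodb_self _ _ _ _ _⟩
      have hPF : i ≤ pvF n r c s.toList i ∧
          pvGoodb n r c s.toList i (pvF n r c s.toList i) = true := hP
      have hokF : ok (pvF n r c s.toList i) = true :=
        (pvOk_iff n r c s i _ hPF.1 hFle).mpr hPF.2
      have hfalse := hb4 (pvF n r c s.toList i) (by omega) hFle
      rw [hokF] at hfalse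
      cases hfalse
    omega
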